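-- pv_equiv track=rewrite | github.com/justanotherfivemdev/25vid-Website | backend/routes/adsb.py | _is_military_icao
-- ===== SOURCE A (Python) =====
-- from typing import Optional
--
-- MILITARY_ICAO_RANGES = [
--     (0xADF7C8, 0xAFFFFF),  # United States
--     (0x43C000, 0x43CFFF),  # United Kingdom
--     (0x3F4000, 0x3F7FFF),  # Germany
--     (0x3E8000, 0x3EBFFF),  # France
--     (0x3A8000, 0x3ABFFF),  # Italy
--     (0x480000, 0x487FFF),  # Netherlands
--     (0x500000, 0x507FFF),  # Belgium
--     (0x4A8000, 0x4AFFFF),  # Norway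
--     (0x4B0000, 0x4B7FFF),  # Denmark
--     (0x4C0000, 0x4C7FFF),  # Greece
--     (0x600000, 0x6003FF),  # Australia
--     (0xC87000, 0xC87FFF),  # Canada
--     (0x7CF800, 0x7CFFFF),  # Japan ASDF
-- ]
--
-- def _is_military_icao(hex_code: Optional[str]) -> bool:
--     """Check if an ICAO hex address falls within known military ranges."""
--     if not hex_code:
--         return False
--     try:
--         addr = int(hex_code.strip(), 16)
--     except (ValueError, TypeError):
--         return False
--     for lo, hi in MILITARY_ICAO_RANGES:
--         if lo <= addr <= hi:
--             return True
--     return False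
-- ===== SOURCE B (Python) =====
-- from typing import Optional
-- import bisect
--
-- MILITARY_ICAO_RANGES = [
--     (0xADF7C8, 0xAFFFFF),  # United States
--     (0x43C000, 0x43CFFF),  # United Kingdom
--     (0x3F4000, 0x3F7FFF),  # Germany
--     (0x3E8000, 0x3EBFFF),  # France
--     (0x3A8000, 0x3ABFFF),  # Italy
--     (0x480000, 0x487FFF),  # Netherlands
--     (0x500000, 0x507FFF),  # Belgium
--     (0x4A8000, 0x4AFFFF),  # Norway
--     (0x4B0000, 0x4B7FFF),  # Denmark
--     (0x4C0000, 0x4C7FFF),  # Greece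
--     (0x600000, 0x6003FF),  # Australia
--     (0xC87000, 0xC87FFF),  # Canada
--     (0x7CF800, 0x7CFFFF),  # Japan ASDF
-- ]
--
-- # Built once at import: ranges sorted by lower bound, plus the list of lower bounds.
-- _SORTED_RANGES = sorted(MILITARY_ICAO_RANGES, key=lambda r: r[0])
-- _LOS = [r[0] for r in _SORTED_RANGES]
--
--
-- def _is_military_icao(hex_code: Optional[str]) -> bool:
--     """Check if an ICAO hex address falls within known military ranges."""
--     if not hex_code:
--         return False
--     try:
--         addr = int(hex_code.strip(), 16)
--     except (ValueError, TypeError):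
--         return False
--     i = bisect.bisect_right(_LOS, addr)
--     return i > 0 and addr <= _SORTED_RANGES[i - 1][1]
-- ===== Notes on version B (the rewrite author's own statement) =====
-- stated objective: alternative
-- what changed: The linear scan over the 13 military ranges is replaced by a binary search (bisect_right) over the ranges pre-sorted by lower bound, testing only the single candidate interval; the guard and hex parse are unchanged.
import Mathlib
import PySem

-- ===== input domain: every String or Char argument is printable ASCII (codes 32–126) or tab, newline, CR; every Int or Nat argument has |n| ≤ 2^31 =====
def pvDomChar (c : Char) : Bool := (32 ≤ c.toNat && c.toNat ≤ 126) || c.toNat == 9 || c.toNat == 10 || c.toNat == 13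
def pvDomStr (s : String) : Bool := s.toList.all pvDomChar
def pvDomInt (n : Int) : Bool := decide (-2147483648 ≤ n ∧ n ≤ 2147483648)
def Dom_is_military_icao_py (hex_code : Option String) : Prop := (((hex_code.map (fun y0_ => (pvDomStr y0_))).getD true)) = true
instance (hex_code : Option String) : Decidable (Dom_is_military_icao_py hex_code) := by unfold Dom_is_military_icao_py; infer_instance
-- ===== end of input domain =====

-- B replaces A's linear scan of the 13 ranges by a bisect_right on the ranges
-- sorted by lower bound, testing one candidate interval (alternative structure).

-- ===== PORT A =====
def pvMilitaryRanges : List (Int × Int) :=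
  [(0xADF7C8, 0xAFFFFF), (0x43C000, 0x43CFFF), (0x3F4000, 0x3F7FFF),
   (0x3E8000, 0x3EBFFF), (0x3A8000, 0x3ABFFF), (0x480000, 0x487FFF),
   (0x500000, 0x507FFF), (0x4A8000, 0x4AFFFF), (0x4B0000, 0x4B7FFF),
   (0x4C0000, 0x4C7FFF), (0x600000, 0x6003FF), (0xC87000, 0xC87FFF),
   (0x7CF800, 0x7CFFFF)]

-- the 'for lo, hi in …: if lo <= addr <= hi: return True' loop, as structural recursion
def pvScan (addr : Int) : List (Int × Int) → Bool
  | [] => false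
  | (lo, hi) :: rest => if lo ≤ addr ∧ addr ≤ hi then true else pvScan addr rest

def is_military_icao_py (hex_code : Option String) : Bool :=
  match hex_code with
  | none => false
  | some s =>
    if s = "" then false    -- 'if not hex_code'
    else
      match PySem.Int.ofStrBase? (PySem.Str.strip s) 16 with
      | none => false       -- except (ValueError, TypeError)
      | some addr => pvScan addr pvMilitaryRanges

-- ===== PORT B =====
def pvSortedRanges : List (Int × Int) := PySem.List.sorted pvMilitaryRanges (fun r => r.1)
def pvLos : List Int := pvSortedRanges.map (fun r => r.1)

-- 'i = bisect_right(_LOS, addr); return i > 0 and addr <= _SORTED_RANGES[i-1][1]'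
def pvBisectCheck (addr : Int) : Bool :=
  let i := PySem.List.bisectRight pvLos addr
  decide (0 < i) && decide (addr ≤ (pvSortedRanges.getD (i - 1) (0, 0)).2)

def is_military_icao_py_alt (hex_code : Option String) : Bool :=
  match hex_code with
  | none => false
  | some s =>
    if s = "" then false
    else
      match PySem.Int.ofStrBase? (PySem.Str.strip s) 16 with
      | none => false
      | some addr => pvBisectCheck addr

-- ===== PRECONDITION & SPEC =====
def Spec_is_military_icao_py (hex_code : Option String) (out : Bool) : Prop := out = is_military_icao_py_alt hex_code
instance (hex_code : Option String) (out : Bool) : Decidable (Spec_is_military_icao_py hex_code out) := by unfold Spec_is_military_icao_py; infer_instance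

-- ===== CLAIM (what is proved, stated in full; the proofs are below) =====
def Claim_equal_is_military_icao_py : Prop := ∀ (hex_code : Option String), Dom_is_military_icao_py hex_code → Spec_is_military_icao_py hex_code (is_military_icao_py hex_code)

-- ===== LEMMAS AND PROOFS =====

lemma pvScan_iff (addr : Int) (xs : List (Int × Int)) :
    pvScan addr xs = true ↔ ∃ p ∈ xs, p.1 ≤ addr ∧ addr ≤ p.2 := by
  induction xs with
  | nil => simp [pvScan]
  | cons p rest ih =>
    obtain ⟨lo, hi⟩ := p
    by_cases h : lo ≤ addr ∧ addr ≤ hi <;> simp [pvScan, h, ih]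

lemma pvLos_pairwise : pvLos.Pairwise (· ≤ ·) := by decide

lemma pvSorted_disjoint : pvSortedRanges.Pairwise (fun a b => a.2 < b.1) := by decide

lemma pvAlt_iff (addr : Int) :
    pvBisectCheck addr = true ↔ ∃ p ∈ pvSortedRanges, p.1 ≤ addr ∧ addr ≤ p.2 := by
  unfold pvBisectCheck
  have hspec := PySem.List.bisectRight_spec pvLos addr pvLos_pairwise
  obtain ⟨hle, hlt_lo, hge_hi⟩ := hspec
  have hlen : pvLos.length = pvSortedRanges.length := by simp [pvLos]
  constructor
  · intro h
    simp only [Bool.and_eq_true, decide_eq_true_eq] at h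
    obtain ⟨hi0, hhi⟩ := h
    set i := PySem.List.bisectRight pvLos addr with hi
    have hidx : i - 1 < pvSortedRanges.length := by omega
    refine ⟨pvSortedRanges[i-1], List.getElem_mem hidx, ?_, ?_⟩
    · have := hlt_lo (i - 1) (by omega) (by omega)
      simpa [pvLos] using this
    · have : pvSortedRanges.getD (i - 1) (0, 0) = pvSortedRanges[i-1] := List.getD_eq_getElem _ _ hidx
      rw [this] at hhi; exact hhi
  · rintro ⟨p, hp, hlo, hhi⟩
    obtain ⟨k, hk, hpk⟩ := List.getElem_of_mem hp
    set i := PySem.List.bisectRight pvLos addr with hi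
    have hki : k < i := by
      by_contra hnot
      have := hge_hi k (by omega) (by omega)
      simp only [pvLos, List.getElem_map, hpk] at this
      omega
    have hi0 : 0 < i := by omega
    have hidx : i - 1 < pvSortedRanges.length := by omega
    have haddrhi : addr ≤ pvSortedRanges[i-1].2 := by
      rcases Nat.lt_or_ge k (i - 1) with hlt | hge
      · -- k < i-1 : range k's hi < range (i-1)'s lo ≤ addr, contradiction with addr ≤ hi_k
        have hdisj := List.pairwise_iff_getElem.mp pvSorted_disjoint k (i-1) hk hidx hlt
        have hlo' := hlt_lo (i - 1) (by omega) (by omega)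
        simp only [pvLos, List.getElem_map] at hlo'
        rw [hpk] at hdisj
        omega
      · have hk' : i - 1 = k := by omega
        simp only [hk', hpk]; exact hhi
    simp only [Bool.and_eq_true, decide_eq_true_eq]
    refine ⟨hi0, ?_⟩
    have : pvSortedRanges.getD (i - 1) (0, 0) = pvSortedRanges[i-1] := List.getD_eq_getElem _ _ hidx
    rw [this]; exact haddrhi

lemma pvScan_eq_alt (addr : Int) :
    pvScan addr pvMilitaryRanges = pvBisectCheck addr := by
  have hperm : pvSortedRanges.Perm pvMilitaryRanges := PySem.List.sorted_perm _ _ _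
  rcases h : pvScan addr pvMilitaryRanges with _ | _
  · symm
    rw [Bool.eq_false_iff]
    intro hc
    obtain ⟨p, hp, h1, h2⟩ := (pvAlt_iff addr).mp hc
    have : pvScan addr pvMilitaryRanges = true :=
      (pvScan_iff addr _).mpr ⟨p, hperm.mem_iff.mp hp, h1, h2⟩
    rw [h] at this; exact absurd this (by simp)
  · symm
    obtain ⟨p, hp, h1, h2⟩ := (pvScan_iff addr _).mp h
    exact (pvAlt_iff addr).mpr ⟨p, hperm.mem_iff.mpr hp, h1, h2⟩

-- ===== VERDICT (by name: the statement is the Claim_ definition above) =====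
theorem is_military_icao_py_spec : Claim_equal_is_military_icao_py := by
  intro hex_code _
  unfold Spec_is_military_icao_py
  cases hex_code with
  | none => rfl
  | some s =>
    show (if s = "" then false
          else match PySem.Int.ofStrBase? (PySem.Str.strip s) 16 with
            | none => false
            | some addr => pvScan addr pvMilitaryRanges) =
         (if s = "" then false
          else match PySem.Int.ofStrBase? (PySem.Str.strip s) 16 with
            | none => false
            | some addr => pvBisectCheck addr)
    by_cases hs : s = ""
    · rw [if_pos hs, if_pos hs]
    · rw [if_neg hs, if_neg hs]
      cases hp : PySem.Int.ofStrBase? (PySem.Str.strip s) 16 with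
      | none => rfl
      | some addr => exact pvScan_eq_alt addr
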